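-- pv_equiv track=rewrite | github.com/SwiftWare-Lab/typed-data-transformation | modeling/clustering/clustering-feature.py | group_and_reorder
-- ===== SOURCE A (Python) =====
-- def group_and_reorder(byte_groups, cluster_labels):
--     """
--     Group and reorder byte groups based on cluster labels.
--
--     :param byte_groups: List of byte arrays.
--     :param cluster_labels: Cluster labels for each group.
--     :return: Ordered list of group indices.
--     """
--     # Combine group indices with their cluster labels and average entropy
--     group_info = []
--     for idx, label in enumerate(cluster_labels):
--         group_info.append({
--             'group_index': idx + 1,
--             'cluster_label': label
--             # Add more metrics if needed
--         })
--
--     # Sort groups by cluster label and then by group index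
--     sorted_groups = sorted(group_info, key=lambda x: (x['cluster_label'], x['group_index']))
--
--     # Extract ordered group indices
--     ordered_indices = [grp['group_index'] for grp in sorted_groups]
--
--     return ordered_indices
-- ===== SOURCE B (Python) =====
-- def group_and_reorder(byte_groups, cluster_labels):
--     """Bucket group indices by cluster label, then emit buckets in sorted
--     label order (indices were appended in increasing order, so the
--     secondary ordering is implicit)."""
--     buckets = {}
--     for idx, label in enumerate(cluster_labels):
--         buckets.setdefault(label, []).append(idx + 1)
--     result = []
--     for label in sorted(buckets):
--         result += buckets[label]
--     return result
-- ===== Notes on version B (the rewrite author's own statement) =====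
-- stated objective: alternative
-- what changed: Replaces building per-group dicts and one tuple-key sort of all n entries by a single bucketing pass into a label-keyed dict followed by sorting only the distinct labels and concatenating the buckets.
import Mathlib
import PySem

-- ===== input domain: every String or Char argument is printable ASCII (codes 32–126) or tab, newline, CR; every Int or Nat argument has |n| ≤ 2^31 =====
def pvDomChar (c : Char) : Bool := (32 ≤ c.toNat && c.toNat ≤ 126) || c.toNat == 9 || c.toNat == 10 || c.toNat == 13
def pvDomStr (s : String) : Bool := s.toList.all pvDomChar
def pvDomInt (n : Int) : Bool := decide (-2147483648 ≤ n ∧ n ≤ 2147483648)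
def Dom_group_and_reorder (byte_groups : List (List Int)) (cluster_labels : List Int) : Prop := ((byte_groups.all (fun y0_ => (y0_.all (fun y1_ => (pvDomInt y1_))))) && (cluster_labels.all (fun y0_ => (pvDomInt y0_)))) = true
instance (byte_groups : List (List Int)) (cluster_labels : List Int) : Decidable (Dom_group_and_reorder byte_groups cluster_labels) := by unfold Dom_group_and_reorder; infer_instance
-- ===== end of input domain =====

-- B buckets the group indices by cluster label in one pass, then sorts only the distinct labels and
-- concatenates the buckets, instead of A's tuple-key sort of per-group records (alternative decomposition).

-- ===== PORT A =====
-- the per-group dict {'group_index': idx+1, 'cluster_label': label} is ported as the pair (group_index, cluster_label)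
def group_and_reorder (byte_groups : List (List Int)) (cluster_labels : List Int) : List Int :=
  let group_info := (PySem.List.enumerate cluster_labels 0).foldl
    (fun acc p => acc ++ [(p.1 + 1, p.2)]) []
  let sorted_groups := PySem.List.sorted2 group_info (fun x => x.2) (fun x => x.1) false
  sorted_groups.map (fun grp => grp.1)

-- ===== PORT B =====
def group_and_reorder_alt (byte_groups : List (List Int)) (cluster_labels : List Int) : List Int :=
  let buckets := (PySem.List.enumerate cluster_labels 0).foldl
    (fun d p => d.modify p.2 [] (fun l => l ++ [p.1 + 1])) PySem.Dict.empty
  (PySem.List.sorted buckets.keys (fun x => x) false).foldl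
    (fun result lab => result ++ buckets.getD lab []) []

-- ===== PRECONDITION & SPEC =====
def Spec_group_and_reorder (byte_groups : List (List Int)) (cluster_labels : List Int) (out : List Int) : Prop := out = group_and_reorder_alt byte_groups cluster_labels
instance (byte_groups : List (List Int)) (cluster_labels : List Int) (out : List Int) : Decidable (Spec_group_and_reorder byte_groups cluster_labels out) := by unfold Spec_group_and_reorder; infer_instance

-- ===== CLAIM (what is proved, stated in full; the proofs are below) =====
def Claim_equal_group_and_reorder : Prop := ∀ (byte_groups : List (List Int)) (cluster_labels : List Int), Dom_group_and_reorder byte_groups cluster_labels → Spec_group_and_reorder byte_groups cluster_labels (group_and_reorder byte_groups cluster_labels)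

-- ===== LEMMAS AND PROOFS =====

-- A's tuple key (label, index) sort is a sort by the lexicographic key toLex (label, index)
theorem sorted2_eq_sorted_lex {α : Type} (xs : List α) (k1 k2 : α → Int) :
    PySem.List.sorted2 xs k1 k2 false
      = PySem.List.sorted xs (fun x => toLex (k1 x, k2 x)) false := by
  have hbefore : (fun a b => decide (k1 a < k1 b) || (!decide (k1 b < k1 a) && decide (k2 a < k2 b)))
      = (fun a b => decide ((toLex (k1 a, k2 a) : Int ×ₗ Int) < toLex (k1 b, k2 b))) := by
    funext a b
    simp only [Prod.Lex.lt_iff]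
    by_cases h1 : k1 a < k1 b <;> by_cases h2 : k1 b < k1 a
    · omega
    · simp [h1, h2]
    · simp [h1, h2]; omega
    · have : k1 a = k1 b := by omega
      simp [h1, h2, this]
  unfold PySem.List.sorted2 PySem.List.sorted
  simp [hbefore]

-- concatenating the per-label filters over a Nodup cover of the labels is a permutation
theorem flatMap_filter_perm (S : List Int) (l : List (Int × Int))
    (hnd : S.Nodup) (hmem : ∀ x ∈ l, x.2 ∈ S) :
    (S.flatMap (fun ℓ => l.filter (fun x => x.2 == ℓ))).Perm l := by
  induction S generalizing l with
  | nil =>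
    have : l = [] := by
      cases l with
      | nil => rfl
      | cons a t => exact absurd (hmem a (by simp)) (by simp)
    simp [this]
  | cons ℓ S ih =>
    simp only [List.flatMap_cons]
    have hnd' := hnd.of_cons
    have hℓ : ℓ ∉ S := by simp at hnd; exact hnd.1
    have key : ∀ ℓ' ∈ S, l.filter (fun x => x.2 == ℓ') = (l.filter (fun x => !(x.2 == ℓ))).filter (fun x => x.2 == ℓ') := by
      intro ℓ' hℓ'
      rw [List.filter_filter]
      apply List.filter_congr
      intro x hx
      have : ℓ' ≠ ℓ := by rintro rfl; exact hℓ hℓ'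
      by_cases h : x.2 = ℓ' <;> simp [h, this]
    have hflat : S.flatMap (fun ℓ' => l.filter (fun x => x.2 == ℓ')) =
        S.flatMap (fun ℓ' => (l.filter (fun x => !(x.2 == ℓ))).filter (fun x => x.2 == ℓ')) := by
      apply List.flatMap_congr
      exact key
    rw [hflat]
    have hperm := ih (l.filter (fun x => !(x.2 == ℓ))) hnd' (by
      intro x hx
      simp only [List.mem_filter] at hx
      have := hmem x hx.1
      simp at this hx
      rcases this with h|h
      · exact absurd h hx.2
      · exact h)
    exact (hperm.append_left _).trans (List.filter_append_perm _ l)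

-- the concatenation of the buckets is pairwise strictly increasing in the lex key (label, index)
theorem pairwise_lex_flatMap (S : List Int) (l : List (Int × Int))
    (hS : List.Pairwise (fun a b => a < b) S)
    (hl : List.Pairwise (fun a b => a.1 < b.1) l) :
    List.Pairwise (fun a b => (toLex (a.2, a.1) : Int ×ₗ Int) < toLex (b.2, b.1))
      (S.flatMap (fun ℓ => l.filter (fun x => x.2 == ℓ))) := by
  induction S with
  | nil => simp
  | cons ℓ S ih =>
    simp only [List.flatMap_cons, List.pairwise_append]
    refine ⟨?_, ih hS.of_cons, ?_⟩
    · refine (hl.filter _).imp_of_mem ?_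
      intro a b ha hb hab
      have ha2 : a.2 = ℓ := by simpa using (List.of_mem_filter ha)
      have hb2 : b.2 = ℓ := by simpa using (List.of_mem_filter hb)
      rw [Prod.Lex.lt_iff]
      right
      exact ⟨by simp [ha2, hb2], hab⟩
    · intro a ha b hb
      have ha2 : a.2 = ℓ := by simpa using (List.of_mem_filter ha)
      simp only [List.mem_flatMap] at hb
      obtain ⟨ℓ', hℓ', hbf⟩ := hb
      have hb2 : b.2 = ℓ' := by simpa using (List.of_mem_filter hbf)
      have : ℓ < ℓ' := (List.pairwise_cons.mp hS).1 ℓ' hℓ'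
      rw [Prod.Lex.lt_iff]
      left
      simp [ha2, hb2, this]

-- ===== VERDICT (by name: the statement is the Claim_ definition above) =====
theorem group_and_reorder_spec : Claim_equal_group_and_reorder := by
  intro byte_groups cluster_labels _
  unfold Spec_group_and_reorder group_and_reorder group_and_reorder_alt
  set e := PySem.List.enumerate cluster_labels 0 with he
  set gi := e.map (fun p => (p.1 + 1, p.2)) with hgi
  set S := PySem.List.sorted (PySem.Set.ofList cluster_labels) (fun x => x) false with hS
  -- B side --
  set buckets := e.foldl (fun d p => d.modify p.2 [] (fun l => l ++ [p.1 + 1])) PySem.Dict.empty with hb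
  have hkeys : buckets.keys = PySem.Set.ofList cluster_labels := by
    rw [hb, PySem.Dict.keys_foldl_modify_key e (fun p => p.2) [] (fun _ p => fun l => l ++ [p.1 + 1]) PySem.Dict.empty]
    rw [PySem.List.map_snd_enumerate, PySem.Set.ofList_eq_foldl]
    simp [PySem.Set.update, PySem.Dict.keys_empty]
  have hgetD : ∀ ℓ, buckets.getD ℓ [] = (e.filter (fun p => p.2 == ℓ)).map (fun p => p.1 + 1) := by
    intro ℓ
    have hfold : buckets = (e.map (fun p => (p.2, p.1 + 1))).foldl
        (fun d q => d.modify q.1 [] (fun l => l ++ [q.2])) PySem.Dict.empty := by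
      rw [hb, List.foldl_map]
    rw [hfold, PySem.Dict.getD_foldl_modify_append]
    simp [List.filter_map, Function.comp_def, List.map_map]
  -- A side --
  have hA : e.foldl (fun acc p => acc ++ [(p.1 + 1, p.2)]) [] = gi := by
    rw [PySem.List.foldl_append_singleton_eq_map]; rfl
  have hperm : (S.flatMap (fun ℓ => gi.filter (fun x => x.2 == ℓ))).Perm gi := by
    apply flatMap_filter_perm
    · exact ((PySem.List.sorted_perm _ _ _).nodup_iff).mpr (PySem.Set.nodup_ofList _)
    · intro x hx
      rw [hS, PySem.List.mem_sorted, PySem.Set.mem_ofList]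
      rw [hgi] at hx
      simp only [List.mem_map] at hx
      obtain ⟨p, hp, rfl⟩ := hx
      have := PySem.List.mem_enumerate_iff cluster_labels 0 p |>.mp hp
      obtain ⟨k, hk, rfl⟩ := this
      simp
  have hpair := pairwise_lex_flatMap S gi (by
      rw [hS]; exact PySem.List.sorted_ofList_pairwise_lt _)
    (by
      rw [hgi]
      refine (PySem.List.pairwise_lt_enumerate cluster_labels 0).map _ ?_
      intro a b hab
      simpa using hab)
  have hsorted : PySem.List.sorted2 gi (fun x => x.2) (fun x => x.1) false
      = S.flatMap (fun ℓ => gi.filter (fun x => x.2 == ℓ)) := by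
    rw [sorted2_eq_sorted_lex]
    exact PySem.List.sorted_eq_of_perm_of_pairwise_lt _ _ _ hperm hpair
  -- combine --
  rw [hA]
  simp only [hsorted, hkeys]
  rw [PySem.List.foldl_append_eq_flatMap, List.nil_append, List.map_flatMap]
  apply List.flatMap_congr
  intro ℓ hℓ
  rw [hgetD ℓ, hgi]
  simp [List.filter_map, Function.comp_def, List.map_map]
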